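-- pv_equiv track=rewrite | github.com/yofn/pyacm | codeforces/2sat/1900/780D/780D队名缩写.py | f
-- ===== SOURCE A (Python) =====
-- def f(ll):
--     d = {}
--     for l in ll:
--         o1 = l[0][:3]
--         o2 = l[0][:2]+l[1][0]
--         if o1 not in d: d[o1]=[]
--         d[o1].append(o2)
--     return d
-- ===== SOURCE B (Python) =====
-- def f(ll):
--     pairs = [(l[0][:3], l[0][:2] + l[1][0]) for l in ll]
--     keys = list(dict.fromkeys(k for k, _ in pairs))
--     return {k: [v for kk, v in pairs if kk == k] for k in keys}
-- ===== Notes on version B (the rewrite author's own statement) =====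
-- stated objective: alternative
-- what changed: Replaces A's single incremental hash-grouping pass (create-empty-then-append per element) with a three-step decomposition: precompute all (key, value) pairs, dedup the keys in first-appearance order, then build each group by a per-key scan comprehension.
import Mathlib
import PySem

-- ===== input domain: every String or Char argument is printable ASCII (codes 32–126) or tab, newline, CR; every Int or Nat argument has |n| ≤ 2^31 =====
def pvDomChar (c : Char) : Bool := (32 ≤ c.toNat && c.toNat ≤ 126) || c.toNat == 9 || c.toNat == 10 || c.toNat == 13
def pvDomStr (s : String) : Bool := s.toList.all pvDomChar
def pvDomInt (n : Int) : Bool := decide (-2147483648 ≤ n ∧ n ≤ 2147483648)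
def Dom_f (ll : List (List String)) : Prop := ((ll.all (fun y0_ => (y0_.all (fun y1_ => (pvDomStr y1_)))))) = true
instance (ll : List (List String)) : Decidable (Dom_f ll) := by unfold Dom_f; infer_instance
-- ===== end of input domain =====

-- B replaces A's incremental dict-grouping pass by: precompute (key, value) pairs, dedup the
-- keys in first-appearance order, then build each group with a per-key scan (objective: alternative).

-- ===== PORT A =====
-- shared slicing helpers: both Pythons compute o1 = l[0][:3] and o2 = l[0][:2] + l[1][0] verbatim
def pvKey (l : List String) : String :=
  PySem.Str.slice (PySem.List.pyGetD l 0 "") none (some 3)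

def pvVal (l : List String) : String :=
  String.ofList ((PySem.Str.slice (PySem.List.pyGetD l 0 "") none (some 2)).toList
    ++ ((PySem.Str.pyGet? (PySem.List.pyGetD l 1 "") 0).elim [] (fun c => [c])))

def f (ll : List (List String)) : List (String × List String) :=
  (ll.foldl (fun (d : PySem.Dict String (List String)) l =>
      let o1 := pvKey l
      let o2 := pvVal l
      let d' := if d.contains o1 then d else d.insert o1 ([] : List String)
      d'.modify o1 [] (fun v => v ++ [o2]))
    PySem.Dict.empty).items

-- ===== PORT B =====
def f_alt (ll : List (List String)) : List (String × List String) :=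
  let pairs := ll.map (fun l => (pvKey l, pvVal l))
  let keys := PySem.List.dedup (pairs.map (fun p => p.1))
  keys.map (fun k => (k, (pairs.filter (fun p => p.1 == k)).map (fun p => p.2)))

-- ===== PRECONDITION & SPEC =====
-- Pre_f excludes exactly the inputs where the Python raises IndexError: some row shorter than 2, or with an empty second string.
def Pre_f (ll : List (List String)) : Prop :=
  ∀ l ∈ ll, 2 ≤ l.length ∧ l.getD 1 "" ≠ ""
instance (ll : List (List String)) : Decidable (Pre_f ll) := by unfold Pre_f; infer_instance

def pvWitness_f : List (List String) := [["abcd", "xy"], ["abq", "z"]]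

def Spec_f (ll : List (List String)) (out : List (String × List String)) : Prop := out = f_alt ll
instance (ll : List (List String)) (out : List (String × List String)) : Decidable (Spec_f ll out) := by unfold Spec_f; infer_instance

-- ===== CLAIM (what is proved, stated in full; the proofs are below) =====
def Claim_equal_f : Prop := ∀ (ll : List (List String)), Dom_f ll → Pre_f ll → Spec_f ll (f ll)

-- ===== LEMMAS AND PROOFS =====

-- A's loop body ('setdefault to [] then append') is the plain modify-append step
theorem pv_step_eq (d : PySem.Dict String (List String)) (k v : String) :
    (if d.contains k then d else d.insert k ([] : List String)).modify k [] (fun w => w ++ [v])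
      = d.modify k [] (fun w => w ++ [v]) := by
  by_cases h : d.contains k
  · simp [h]
  · have h' : d.contains k = false := by simpa using h
    simp only [h', Bool.false_eq_true, if_false, PySem.Dict.modify,
      PySem.Dict.getD_insert_self, PySem.Dict.insert_insert_self]
    rw [PySem.Dict.getD_of_not_contains d [] h']

theorem pv_foldA_eq (ll : List (List String)) (d : PySem.Dict String (List String)) :
    ll.foldl (fun d l =>
        let o1 := pvKey l
        let o2 := pvVal l
        let d' := if d.contains o1 then d else d.insert o1 ([] : List String)
        d'.modify o1 [] (fun v => v ++ [o2])) d
      = ll.foldl (fun d l => d.modify (pvKey l) [] (fun v => v ++ [pvVal l])) d := by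
  simp only [pv_step_eq]

-- ===== VERDICT (by name: the statement is the Claim_ definition above) =====
theorem f_spec : Claim_equal_f := by
  intro ll _ _
  unfold Spec_f f f_alt
  rw [pv_foldA_eq]
  have hkeys := PySem.Dict.keys_foldl_modify_key ll pvKey ([] : List String)
    (fun _ l => (fun v => v ++ [pvVal l])) PySem.Dict.empty
  have hnd := PySem.Dict.nodup_keys_foldl_modify_key ll pvKey ([] : List String)
    (fun _ l => (fun v => v ++ [pvVal l])) PySem.Dict.empty PySem.Dict.nodup_keys_empty
  rw [PySem.Dict.items_eq_map_keys _ hnd ([] : List String), hkeys]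
  have hmap : ll.foldl (fun d l => d.modify (pvKey l) [] (fun v => v ++ [pvVal l])) PySem.Dict.empty
      = (ll.map (fun l => (pvKey l, pvVal l))).foldl
          (fun d p => d.modify p.1 [] (fun v => v ++ [p.2])) PySem.Dict.empty := by
    rw [List.foldl_map]
  simp only [hmap, PySem.Dict.getD_foldl_modify_append, PySem.Dict.getD_empty, List.nil_append,
    PySem.List.dedup_eq_ofList, List.map_map]
  rfl
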